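-- pv_equiv track=rewrite | github.com/ivan-sitnikoff/Tubingen | Ex05/ex_05.py | get_prefix_frequencies
-- ===== SOURCE A (Python) =====
-- def get_prefix_frequencies(frequencies):
--     """
--     Computes a list of (prefix,frequency) pairs from a list of (token,frequency) pairs
--     by counting every prefix [0:i] of each token, and adding the counts for each prefix.
--     """
--     prefix_freq = {}
--     for word, freq in frequencies:
--         prefix = ''
--         for letter in word:
--             prefix += letter
--             if prefix in prefix_freq:
--                 prefix_freq[prefix] += freq
--             else:
--                 prefix_freq[prefix]  = freq
--     return sorted(list(prefix_freq.items()))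
-- ===== SOURCE B (Python) =====
-- def get_prefix_frequencies(frequencies):
--     """
--     Computes a list of (prefix,frequency) pairs from a list of (token,frequency) pairs
--     by counting every prefix [0:i] of each token, and adding the counts for each prefix.
--     """
--     pairs = [(word[:i], freq) for word, freq in frequencies for i in range(1, len(word) + 1)]
--     out = []
--     for p in sorted(set(px for px, _ in pairs)):
--         out.append((p, sum(f for px, f in pairs if px == p)))
--     return out
-- ===== Notes on version B (the rewrite author's own statement) =====
-- stated objective: alternative
-- what changed: Replaces A's stateful dict-accumulation loop (running prefix string, in-place += per prefix, final sort of the items) with a declarative pipeline: materialize every (prefix, frequency) pair by slicing, then emit each distinct prefix in sorted order paired with the sum of the frequencies of its occurrences.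
import Mathlib
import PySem

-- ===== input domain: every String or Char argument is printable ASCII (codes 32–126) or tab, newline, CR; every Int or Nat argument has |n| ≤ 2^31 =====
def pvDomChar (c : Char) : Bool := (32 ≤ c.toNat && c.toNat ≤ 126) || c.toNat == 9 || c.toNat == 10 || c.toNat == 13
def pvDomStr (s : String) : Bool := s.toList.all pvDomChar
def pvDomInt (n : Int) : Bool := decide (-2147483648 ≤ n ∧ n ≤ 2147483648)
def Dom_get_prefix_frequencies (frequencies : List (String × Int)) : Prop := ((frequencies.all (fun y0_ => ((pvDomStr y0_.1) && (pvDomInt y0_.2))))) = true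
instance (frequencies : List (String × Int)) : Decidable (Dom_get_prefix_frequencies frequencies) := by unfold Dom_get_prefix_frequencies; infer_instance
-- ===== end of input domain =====

-- B replaces A's dict-accumulation loop with a flatten / dedup-sort / sum-per-key pipeline (alternative decomposition, same results).

-- ===== PORT A =====
-- the growing prefix is kept as its list of characters; the dict key is that prefix as a String
def get_prefix_frequencies (frequencies : List (String × Int)) : List (String × Int) :=
  let prefix_freq : PySem.Dict String Int :=
    frequencies.foldl (fun d wf =>
      (wf.1.toList.foldl (fun (st : List Char × PySem.Dict String Int) letter =>
        let p := st.1 ++ [letter]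
        let key := String.ofList p
        if st.2.contains key then (p, st.2.insert key (st.2.getD key 0 + wf.2))
        else (p, st.2.insert key wf.2)) ([], d)).2) PySem.Dict.empty
  PySem.List.sorted2 prefix_freq.items (fun p => p.1) (fun p => p.2) false

-- ===== PORT B =====
def get_prefix_frequencies_alt (frequencies : List (String × Int)) : List (String × Int) :=
  let pairs : List (String × Int) := frequencies.flatMap (fun wf =>
    (PySem.List.pyRange 1 (PySem.Str.len wf.1 + 1)).map (fun i => (PySem.Str.slice wf.1 none (some i), wf.2)))
  (PySem.List.sorted (PySem.Set.ofList (pairs.map (fun p => p.1))) (fun k => k) false).map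
    (fun p => (p, ((pairs.filter (fun q => q.1 == p)).map (fun q => q.2)).sum))

-- ===== PRECONDITION & SPEC =====
def Spec_get_prefix_frequencies (frequencies : List (String × Int)) (out : List (String × Int)) : Prop := out = get_prefix_frequencies_alt frequencies
instance (frequencies : List (String × Int)) (out : List (String × Int)) : Decidable (Spec_get_prefix_frequencies frequencies out) := by unfold Spec_get_prefix_frequencies; infer_instance

-- ===== CLAIM (what is proved, stated in full; the proofs are below) =====
def Claim_equal_get_prefix_frequencies : Prop := ∀ (frequencies : List (String × Int)), Dom_get_prefix_frequencies frequencies → Spec_get_prefix_frequencies frequencies (get_prefix_frequencies frequencies)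

-- ===== LEMMAS AND PROOFS =====

-- all nonempty prefixes of a word, starting from an already-accumulated prefix p0
def pvPrefsFrom (p0 cs : List Char) : List String :=
  (List.range cs.length).map (fun i => String.ofList (p0 ++ cs.take (i + 1)))

-- the list of (prefix, freq) occurrences both programs aggregate
def pvPairs (fs : List (String × Int)) : List (String × Int) :=
  fs.flatMap (fun wf => (pvPrefsFrom [] wf.1.toList).map (fun p => (p, wf.2)))

def pvStep (d : PySem.Dict String Int) (pf : String × Int) : PySem.Dict String Int :=
  d.insert pf.1 (d.getD pf.1 0 + pf.2)

lemma pvPrefsFrom_cons (p0 : List Char) (c : Char) (cs : List Char) :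
    pvPrefsFrom p0 (c :: cs) = String.ofList (p0 ++ [c]) :: pvPrefsFrom (p0 ++ [c]) cs := by
  simp [pvPrefsFrom, List.range_succ_eq_map, List.map_map, Function.comp_def, List.append_assoc]

lemma pv_step_eq (f : Int) (st : List Char × PySem.Dict String Int) (letter : Char) :
    (let p := st.1 ++ [letter]
     let key := String.ofList p
     if st.2.contains key then (p, st.2.insert key (st.2.getD key 0 + f))
     else (p, st.2.insert key f))
      = (st.1 ++ [letter], pvStep st.2 (String.ofList (st.1 ++ [letter]), f)) := by
  simp only [pvStep]
  split_ifs with h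
  · rfl
  · have h2 := (PySem.Dict.get?_eq_none_iff_contains st.2 (String.ofList (st.1 ++ [letter]))).2
      (by simpa using h)
    have hg : st.2.getD (String.ofList (st.1 ++ [letter])) 0 = 0 := by
      simp only [PySem.Dict.getD, h2, Option.getD_none]
    rw [hg, zero_add]

lemma pv_inner (f : Int) (cs : List Char) : ∀ (p0 : List Char) (d : PySem.Dict String Int),
    (cs.foldl (fun (st : List Char × PySem.Dict String Int) letter =>
        let p := st.1 ++ [letter]
        let key := String.ofList p
        if st.2.contains key then (p, st.2.insert key (st.2.getD key 0 + f))
        else (p, st.2.insert key f)) (p0, d)).2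
      = (pvPrefsFrom p0 cs).foldl (fun d k => pvStep d (k, f)) d := by
  induction cs with
  | nil => intro p0 d; simp [pvPrefsFrom]
  | cons c cs ih =>
    intro p0 d
    rw [pvPrefsFrom_cons]
    simp only [List.foldl_cons, pv_step_eq]
    simp only [pv_step_eq] at ih
    exact ih (p0 ++ [c]) _

lemma pv_dict_eq (fs : List (String × Int)) :
    (fs.foldl (fun d wf =>
      (wf.1.toList.foldl (fun (st : List Char × PySem.Dict String Int) letter =>
        let p := st.1 ++ [letter]
        let key := String.ofList p
        if st.2.contains key then (p, st.2.insert key (st.2.getD key 0 + wf.2))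
        else (p, st.2.insert key wf.2)) ([], d)).2) PySem.Dict.empty)
    = (pvPairs fs).foldl pvStep PySem.Dict.empty := by
  rw [pvPairs, List.foldl_flatMap]
  congr 1
  funext d wf
  rw [pv_inner wf.2 wf.1.toList [] d, List.foldl_map]

lemma pv_getD_fold (l : List (String × Int)) : ∀ (d : PySem.Dict String Int) (k : String),
    (l.foldl pvStep d).getD k 0 = d.getD k 0 + ((l.filter (fun q => q.1 == k)).map (fun q => q.2)).sum := by
  induction l with
  | nil => intro d k; simp
  | cons pf l ih =>
    intro d k
    simp only [List.foldl_cons, ih, List.filter_cons]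
    by_cases h : pf.1 = k
    · subst h
      simp only [beq_self_eq_true, if_true, List.map_cons, List.sum_cons, pvStep,
        PySem.Dict.getD_insert_self]
      ring
    · simp only [show (pf.1 == k) = false by simpa using h, Bool.false_eq_true, if_false, pvStep]
      rw [PySem.Dict.getD_insert_of_ne _ _ _ (Ne.symm h)]

-- pointwise-equal insertion tests give the same insertion
lemma pv_insertBy_congr {α : Type} (f g : α → α → Bool) (x : α) (ys : List α)
    (h : ∀ y ∈ ys, f x y = g x y) : PySem.List.insertBy f x ys = PySem.List.insertBy g x ys := by
  induction ys with
  | nil => rfl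
  | cons y ys ih =>
    simp only [PySem.List.insertBy]
    rw [h y (by simp)]
    by_cases hb : g x y = true
    · simp [hb]
    · simp only [hb, Bool.false_eq_true, if_false]
      rw [ih (fun z hz => h z (by simp [hz]))]

lemma pv_foldl_insertBy_congr {α : Type} (f g : α → α → Bool) (l : List α) :
    ∀ (acc : List α), (∀ a ∈ l, ∀ b ∈ acc, f a b = g a b) → (∀ a ∈ l, ∀ b ∈ l, f a b = g a b) →
    l.foldl (fun acc x => PySem.List.insertBy f x acc) acc
      = l.foldl (fun acc x => PySem.List.insertBy g x acc) acc := by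
  induction l with
  | nil => intro acc _ _; rfl
  | cons hd tl ih =>
    intro acc hacc hl
    simp only [List.foldl_cons]
    rw [pv_insertBy_congr f g hd acc (fun y hy => hacc hd (by simp) y hy)]
    exact ih _
      (fun a ha b hb => by
        rcases (PySem.List.mem_insertBy g hd b acc).1 hb with hb' | hb'
        · rw [hb']; exact hl a (by simp [ha]) hd (by simp)
        · exact hacc a (by simp [ha]) b hb')
      (fun a ha b hb => hl a (by simp [ha]) b (by simp [hb]))

-- on a list whose elements are determined by their first component, Python's tuple sort is the sort by first key
lemma pv_sorted2_eq_sorted (xs : List (String × Int))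
    (h : ∀ a ∈ xs, ∀ b ∈ xs, a.1 = b.1 → a = b) :
    PySem.List.sorted2 xs (fun p => p.1) (fun p => p.2) false
      = PySem.List.sorted xs (fun p => p.1) false := by
  show xs.foldl (fun acc x => PySem.List.insertBy
      (fun a b => decide (a.1 < b.1) || (!decide (b.1 < a.1) && decide (a.2 < b.2))) x acc) []
    = xs.foldl (fun acc x => PySem.List.insertBy (fun a b => decide (a.1 < b.1)) x acc) []
  apply pv_foldl_insertBy_congr _ _ xs [] (by simp)
  intro a ha b hb
  rcases lt_trichotomy a.1 b.1 with hc | hc | hc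
  · simp [hc]
  · have hab : a = b := h a ha b hb hc
    subst hab
    simp
  · simp [lt_asymm hc, hc]

-- one word of B's pair list, with the range index rewritten to a Nat
lemma pv_word (w : String) (fr : Int) (n : Nat) :
    (PySem.List.pyRange 1 ((n : Int) + 1)).map (fun i => (PySem.Str.slice w none (some i), fr))
      = (List.range n).map (fun i => (String.ofList (w.toList.take (i + 1)), fr)) := by
  induction n with
  | zero => rfl
  | succ n ih =>
    rw [show ((n + 1 : Nat) : Int) + 1 = ((n : Int) + 1) + 1 by push_cast; ring,
      PySem.List.pyRange_one_succ_right (by omega), List.map_append, ih, List.range_succ,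
      List.map_append]
    congr 1
    have hslice : PySem.Str.slice w none (some ((n : Int) + 1)) = String.ofList (w.toList.take (n + 1)) := by
      conv_lhs => rw [← String.ofList_toList (s := PySem.Str.slice w none (some ((n : Int) + 1)))]
      rw [PySem.Str.toList_slice]
      simp only [PySem.Chars.slice_eq_listSlice]
      rw [PySem.List.slice_to _ (by omega)]
      norm_num
    simp [hslice]

-- ===== VERDICT (by name: the statement is the Claim_ definition above) =====
theorem get_prefix_frequencies_spec : Claim_equal_get_prefix_frequencies := by
  intro fs _
  unfold Spec_get_prefix_frequencies
  show get_prefix_frequencies fs = get_prefix_frequencies_alt fs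
  simp only [get_prefix_frequencies, get_prefix_frequencies_alt]
  -- B's pair list is pvPairs fs
  have hpairs : (fs.flatMap (fun wf =>
      (PySem.List.pyRange 1 (PySem.Str.len wf.1 + 1)).map (fun i => (PySem.Str.slice wf.1 none (some i), wf.2))))
      = pvPairs fs := by
    unfold pvPairs
    congr 1
    funext wf
    rw [show PySem.Str.len wf.1 = ((wf.1.toList.length : Nat) : Int) from rfl, pv_word]
    simp [pvPrefsFrom, List.map_map, Function.comp_def]
  rw [hpairs, pv_dict_eq]
  -- A's dict: keys, their uniqueness, and the items list
  set D := (pvPairs fs).foldl pvStep PySem.Dict.empty with hD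
  have hkeys : D.keys = PySem.Set.ofList ((pvPairs fs).map (fun p => p.1)) := by
    have h := PySem.Dict.keys_foldl_insert_key (ν := Int) (pvPairs fs)
      (fun q : String × Int => q.1) (fun d pf => d.getD pf.1 0 + pf.2) PySem.Dict.empty
    rw [PySem.Dict.keys_empty, PySem.Set.update_nil_left] at h
    exact h
  have hnodup : D.keys.Nodup := by
    rw [hkeys]; exact PySem.Set.nodup_ofList _
  have hitems : D.items = (PySem.Set.ofList ((pvPairs fs).map (fun p => p.1))).map
      (fun k => (k, (((pvPairs fs).filter (fun q => q.1 == k)).map (fun q => q.2)).sum)) := by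
    rw [PySem.Dict.items_eq_map_keys D hnodup 0, hkeys]
    refine List.map_congr_left ?_
    intro k _
    rw [hD, pv_getD_fold]
    simp [PySem.Dict.getD_empty]
  rw [hitems]
  rw [pv_sorted2_eq_sorted _ (by
    intro a ha b hb hab
    rcases List.mem_map.1 ha with ⟨k, _, rfl⟩
    rcases List.mem_map.1 hb with ⟨k', _, rfl⟩
    simp only at hab
    subst hab
    rfl)]
  refine PySem.List.sorted_eq_of_perm_of_pairwise_lt _ _ (fun p : String × Int => p.1) ?_ ?_
  · exact (PySem.List.sorted_perm _ _ _).map _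
  · rw [List.pairwise_map]
    exact PySem.List.sorted_ofList_pairwise_lt _
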